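-- pv_equiv track=rewrite | github.com/pypi-data/pypi-mirror-395 | packages/biosynth-tool/biosynth_tool-1.1.0.tar.gz/biosynth_tool-1.1.0/biosynth/utils/display_utils.py | mark_non_equal_characters
-- ===== SOURCE A (Python) =====
-- def mark_non_equal_characters(input_seq, optimized_seq, coding_positions):
--     """
--     Marks non-equal characters between two sequences, distinguishing coding and non-coding regions.
--
--     Args:
--         input_seq (str): Original input sequence.
--         optimized_seq (str): Optimized sequence to compare against the input sequence.
--         coding_positions (list): Precomputed array where each index contains 0 for non-coding
--                                 or 1, 2, 3 for coding positions.
--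
--     Returns:
--         tuple: index_seq, marked_seq1, marked_seq2
--             - index_seq: String representation of sequence indices.
--             - marked_seq1: Marked input sequence with differences highlighted.
--             - marked_seq2: Marked optimized sequence with differences highlighted.
--     """
--     if len(input_seq) != len(optimized_seq):
--         raise ValueError(
--             f"Input sequence and optimized sequence must be of the same length:\nlen(input_seq) = {len(input_seq)} != len(optimized_seq) = {len(optimized_seq)}")
--
--     marked_seq1 = []
--     marked_seq2 = []
--     index_seq = []
--
--     i = 0
--     while i < len(coding_positions):
--         if coding_positions[i] != 0:
--             # Coding region: process in codons (3 characters at a time)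
--             start = i
--             while i < len(coding_positions) and coding_positions[i] != 0:
--                 i += 1
--             end = i
--
--             for j in range(start, end, 3):
--                 index_seq.append(f"{j + 1}-{j + 3}")
--                 codon_input = input_seq[j:j + 3]
--                 codon_optimized = optimized_seq[j:j + 3]
--                 if codon_input != codon_optimized:
--                     marked_seq1.append(f"[{codon_input}]")
--                     marked_seq2.append(f"[{codon_optimized}]")
--                 else:
--                     marked_seq1.append(codon_input)
--                     marked_seq2.append(codon_optimized)
--         else:
--             # Non-coding region: process single characters
--             start = i
--             while i < len(coding_positions) and coding_positions[i] == 0: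
--                 i += 1
--             end = i
--
--             for j in range(start, end):
--                 index_seq.append(f"{j + 1}")
--                 char_input = input_seq[j]
--                 char_optimized = optimized_seq[j]
--                 if char_input != char_optimized:
--                     marked_seq1.append(f"[{char_input}]")
--                     marked_seq2.append(f"[{char_optimized}]")
--                 else:
--                     marked_seq1.append(char_input)
--                     marked_seq2.append(char_optimized)
--
--     # Create formatted strings for output
--     index_seq = ''.join([f'{i:12}' for i in index_seq])
--     marked_seq1 = ''.join([f'{i:12}' for i in marked_seq1])
--     marked_seq2 = ''.join([f'{i:12}' for i in marked_seq2])
--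
--     return index_seq, marked_seq1, marked_seq2
-- ===== SOURCE B (Python) =====
-- def mark_non_equal_characters(input_seq, optimized_seq, coding_positions):
--     if len(input_seq) != len(optimized_seq):
--         raise ValueError(
--             f"Input sequence and optimized sequence must be of the same length:\nlen(input_seq) = {len(input_seq)} != len(optimized_seq) = {len(optimized_seq)}")
--
--     index_seq = []
--     marked_seq1 = []
--     marked_seq2 = []
--
--     # Single fused pass: c counts the offset inside the current coding run;
--     # a codon token is emitted exactly when that offset is a multiple of 3.
--     c = 0
--     for j, p in enumerate(coding_positions):
--         if p == 0:
--             c = 0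
--             index_seq.append(f"{j + 1}")
--             a = input_seq[j]
--             b = optimized_seq[j]
--             marked_seq1.append(f"[{a}]" if a != b else a)
--             marked_seq2.append(f"[{b}]" if a != b else b)
--         else:
--             if c % 3 == 0:
--                 index_seq.append(f"{j + 1}-{j + 3}")
--                 a = input_seq[j:j + 3]
--                 b = optimized_seq[j:j + 3]
--                 marked_seq1.append(f"[{a}]" if a != b else a)
--                 marked_seq2.append(f"[{b}]" if a != b else b)
--             c += 1
--
--     return (''.join(t.ljust(12) for t in index_seq),
--             ''.join(t.ljust(12) for t in marked_seq1),
--             ''.join(t.ljust(12) for t in marked_seq2))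
-- ===== Notes on version B (the rewrite author's own statement) =====
-- stated objective: simpler
-- what changed: A's nested while-loops that first scan out each coding/non-coding run and then re-iterate it (stepping by 3 for codons) are replaced by a single fused enumerate pass that keeps a codon-offset counter c, emitting a char token at every zero position and a codon token exactly when c % 3 == 0 inside a coding run.
import Mathlib
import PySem

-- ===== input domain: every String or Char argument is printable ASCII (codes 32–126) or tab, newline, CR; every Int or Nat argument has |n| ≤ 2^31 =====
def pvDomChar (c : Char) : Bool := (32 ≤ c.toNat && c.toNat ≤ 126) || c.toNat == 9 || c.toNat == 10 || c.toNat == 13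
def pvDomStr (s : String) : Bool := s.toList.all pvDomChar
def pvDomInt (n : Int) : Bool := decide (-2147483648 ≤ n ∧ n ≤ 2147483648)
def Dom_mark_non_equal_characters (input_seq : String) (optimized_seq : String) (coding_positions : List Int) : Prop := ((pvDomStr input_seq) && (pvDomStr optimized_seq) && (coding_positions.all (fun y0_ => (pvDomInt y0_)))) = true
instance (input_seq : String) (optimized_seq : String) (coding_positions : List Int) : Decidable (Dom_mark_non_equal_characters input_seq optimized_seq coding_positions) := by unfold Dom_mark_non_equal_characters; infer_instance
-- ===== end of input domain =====

-- B replaces A's nested run-detecting while-loops by one fused pass with a codon-offset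
-- counter (objective: simpler, same O(n) cost).  Both ports work on String.toList; Python's
-- 1-char string input_seq[j] is represented as its 1-element char list.  Index loops are
-- driven by an exact iteration-count fuel argument (total-function bookkeeping only).

-- shared token builders (the f-string expressions are textually identical in A and B)
abbrev PvAcc := List (List Char) × List (List Char) × List (List Char)

-- f'{t:12}' on a string left-justifies, padding with spaces to width 12
def pvFmt12 (t : List Char) : List Char := t ++ List.replicate (12 - t.length) ' '

-- ''.join(f'{t:12}' for t in ts)
def pvJoin (ts : List (List Char)) : String := String.ofList ((ts.map pvFmt12).flatten)

-- appends f"{j+1}" and the (possibly bracketed) chars input_seq[j], optimized_seq[j];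
-- s[j] is exact for j < len (Pre_ guarantees it; Python raises IndexError otherwise)
def pvPushChar (inp opt : List Char) (j : Nat) (acc : PvAcc) : PvAcc :=
  let a : List Char := [inp.getD j ' ']
  let b : List Char := [opt.getD j ' ']
  (acc.1 ++ [PySem.Int.toChars ((j : Int) + 1)],
   acc.2.1 ++ [if a ≠ b then '[' :: (a ++ [']']) else a],
   acc.2.2 ++ [if a ≠ b then '[' :: (b ++ [']']) else b])

-- appends f"{j+1}-{j+3}" and the (possibly bracketed) slices s[j:j+3] (slices clamp, exact)
def pvPushCodon (inp opt : List Char) (j : Nat) (acc : PvAcc) : PvAcc :=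
  let a := PySem.List.slice inp (some (j : Int)) (some ((j : Int) + 3))
  let b := PySem.List.slice opt (some (j : Int)) (some ((j : Int) + 3))
  (acc.1 ++ [PySem.Int.toChars ((j : Int) + 1) ++ '-' :: PySem.Int.toChars ((j : Int) + 3)],
   acc.2.1 ++ [if a ≠ b then '[' :: (a ++ [']']) else a],
   acc.2.2 ++ [if a ≠ b then '[' :: (b ++ [']']) else b])

-- ===== PORT A =====
-- 'while i < len(coding_positions) and (coding_positions[i] != 0) == nz: i += 1'
def pvScanF (cp : List Int) (nz : Bool) : Nat → Nat → Nat
  | 0, i => i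
  | fuel + 1, i =>
    if i < cp.length then
      (if decide (cp.getD i 0 ≠ 0) = nz then pvScanF cp nz fuel (i + 1) else i)
    else i

def pvScan (cp : List Int) (nz : Bool) (i : Nat) : Nat := pvScanF cp nz (cp.length - i) i

-- 'for j in range(start, end, 3)' body of the coding branch
def pvForCodonsF (inp opt : List Char) (e : Nat) : Nat → Nat → PvAcc → PvAcc
  | 0, _, acc => acc
  | fuel + 1, j, acc =>
    if j < e then pvForCodonsF inp opt e fuel (j + 3) (pvPushCodon inp opt j acc) else acc

def pvForCodons (inp opt : List Char) (e : Nat) (j : Nat) (acc : PvAcc) : PvAcc :=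
  pvForCodonsF inp opt e ((e - j + 2) / 3) j acc

-- 'for j in range(start, end)' body of the non-coding branch
def pvForCharsF (inp opt : List Char) (e : Nat) : Nat → Nat → PvAcc → PvAcc
  | 0, _, acc => acc
  | fuel + 1, j, acc =>
    if j < e then pvForCharsF inp opt e fuel (j + 1) (pvPushChar inp opt j acc) else acc

def pvForChars (inp opt : List Char) (e : Nat) (j : Nat) (acc : PvAcc) : PvAcc :=
  pvForCharsF inp opt e (e - j) j acc

-- the outer 'while i < len(coding_positions)' loop of A
def pvLoopAF (inp opt : List Char) (cp : List Int) : Nat → Nat → PvAcc → PvAcc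
  | 0, _, acc => acc
  | fuel + 1, i, acc =>
    if i < cp.length then
      (if cp.getD i 0 ≠ 0 then
        pvLoopAF inp opt cp fuel (pvScan cp true i) (pvForCodons inp opt (pvScan cp true i) i acc)
      else
        pvLoopAF inp opt cp fuel (pvScan cp false i) (pvForChars inp opt (pvScan cp false i) i acc))
    else acc

def pvLoopA (inp opt : List Char) (cp : List Int) (i : Nat) (acc : PvAcc) : PvAcc :=
  pvLoopAF inp opt cp (cp.length - i) i acc

def mark_non_equal_characters (input_seq : String) (optimized_seq : String) (coding_positions : List Int) : String × String × String :=
  if PySem.Str.len input_seq ≠ PySem.Str.len optimized_seq then ("", "", "")  -- Python raises ValueError here; excluded by Pre_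
  else
    let r := pvLoopA input_seq.toList optimized_seq.toList coding_positions 0 ([], [], [])
    (pvJoin r.1, pvJoin r.2.1, pvJoin r.2.2)

-- ===== PORT B =====
-- B's single 'for j, p in enumerate(coding_positions)' pass with codon-offset counter c
def pvLoopB (inp opt : List Char) : List Int → Nat → Nat → PvAcc → PvAcc
  | [], _, _, acc => acc
  | p :: rest, j, c, acc =>
    if p = 0 then pvLoopB inp opt rest (j + 1) 0 (pvPushChar inp opt j acc)
    else pvLoopB inp opt rest (j + 1) (c + 1) (if c % 3 = 0 then pvPushCodon inp opt j acc else acc)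

def mark_non_equal_characters_alt (input_seq : String) (optimized_seq : String) (coding_positions : List Int) : String × String × String :=
  if PySem.Str.len input_seq ≠ PySem.Str.len optimized_seq then ("", "", "")  -- same ValueError guard as A; excluded by Pre_
  else
    let r := pvLoopB input_seq.toList optimized_seq.toList coding_positions 0 0 ([], [], [])
    (pvJoin r.1, pvJoin r.2.1, pvJoin r.2.2)

-- ===== PRECONDITION & SPEC =====
-- Pre_ = exactly where A returns: equal lengths (else ValueError) and every non-coding
-- index inside the sequences (else input_seq[j] raises IndexError).
def Pre_mark_non_equal_characters (input_seq : String) (optimized_seq : String) (coding_positions : List Int) : Prop :=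
  PySem.Str.len input_seq = PySem.Str.len optimized_seq ∧
  ∀ j : Nat, j < coding_positions.length → coding_positions.getD j 0 = 0 → j < input_seq.toList.length

instance (input_seq : String) (optimized_seq : String) (coding_positions : List Int) : Decidable (Pre_mark_non_equal_characters input_seq optimized_seq coding_positions) := by unfold Pre_mark_non_equal_characters; infer_instance

def pvWitness_mark_non_equal_characters : String × String × List Int := ("ACGTA", "ACCTA", [1, 2, 3, 0, 0])

def Spec_mark_non_equal_characters (input_seq : String) (optimized_seq : String) (coding_positions : List Int) (out : String × String × String) : Prop := out = mark_non_equal_characters_alt input_seq optimized_seq coding_positions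
instance (input_seq : String) (optimized_seq : String) (coding_positions : List Int) (out : String × String × String) : Decidable (Spec_mark_non_equal_characters input_seq optimized_seq coding_positions out) := by unfold Spec_mark_non_equal_characters; infer_instance

-- ===== CLAIM (what is proved, stated in full; the proofs are below) =====
def Claim_equal_mark_non_equal_characters : Prop := ∀ (input_seq : String) (optimized_seq : String) (coding_positions : List Int), Dom_mark_non_equal_characters input_seq optimized_seq coding_positions → Pre_mark_non_equal_characters input_seq optimized_seq coding_positions → Spec_mark_non_equal_characters input_seq optimized_seq coding_positions (mark_non_equal_characters input_seq optimized_seq coding_positions)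

-- ===== LEMMAS AND PROOFS =====

theorem pvWitness_ok :
    Dom_mark_non_equal_characters (pvWitness_mark_non_equal_characters.1) (pvWitness_mark_non_equal_characters.2.1) (pvWitness_mark_non_equal_characters.2.2) ∧
    Pre_mark_non_equal_characters (pvWitness_mark_non_equal_characters.1) (pvWitness_mark_non_equal_characters.2.1) (pvWitness_mark_non_equal_characters.2.2) := by
  decide

-- one-step unfolding of the fuelled loops (the fuel is always the exact iteration count)
theorem pvScan_unfold (cp : List Int) (nz : Bool) (i : Nat) :
    pvScan cp nz i =
      if i < cp.length then
        (if decide (cp.getD i 0 ≠ 0) = nz then pvScan cp nz (i + 1) else i)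
      else i := by
  unfold pvScan
  rcases h : cp.length - i with _ | k
  · have hi : ¬ i < cp.length := by omega
    simp [pvScanF, hi]
  · simp only [pvScanF]
    by_cases hi : i < cp.length
    · simp only [hi, if_pos]
      have hk : k = cp.length - (i + 1) := by omega
      rw [hk]
    · simp [hi]

theorem pvScan_ge (cp : List Int) (nz : Bool) (i : Nat) : i ≤ pvScan cp nz i := by
  rw [pvScan_unfold]
  split
  · split
    · have h := pvScan_ge cp nz (i + 1); omega
    · exact le_refl _
  · exact le_refl _
termination_by cp.length - i

theorem pvScan_lt (cp : List Int) (nz : Bool) (i : Nat) (h : i < cp.length)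
    (hc : decide (cp.getD i 0 ≠ 0) = nz) : i < pvScan cp nz i := by
  rw [pvScan_unfold, if_pos h, if_pos hc]
  have := pvScan_ge cp nz (i + 1)
  omega

theorem pvScan_le (cp : List Int) (nz : Bool) (i : Nat) (h : i ≤ cp.length) :
    pvScan cp nz i ≤ cp.length := by
  rw [pvScan_unfold]
  split
  · split
    · exact pvScan_le cp nz (i + 1) (by omega)
    · exact h
  · exact h
termination_by cp.length - i

theorem pvScan_run (cp : List Int) (nz : Bool) (i : Nat) :
    ∀ k, i ≤ k → k < pvScan cp nz i → decide (cp.getD k 0 ≠ 0) = nz := by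
  intro k hik hk
  rw [pvScan_unfold] at hk
  split at hk
  · split at hk
    · rcases Nat.eq_or_lt_of_le hik with rfl | hlt
      · assumption
      · exact pvScan_run cp nz (i + 1) k hlt hk
    · omega
  · omega
termination_by cp.length - i

theorem pvScan_stop (cp : List Int) (nz : Bool) (i : Nat) (h : i ≤ cp.length) :
    pvScan cp nz i = cp.length ∨ decide (cp.getD (pvScan cp nz i) 0 ≠ 0) ≠ nz := by
  rw [pvScan_unfold]
  split
  · split
    · exact pvScan_stop cp nz (i + 1) (by omega)
    · right; simp_all
  · left; omega
termination_by cp.length - i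

theorem pvForCodons_unfold (inp opt : List Char) (e j : Nat) (acc : PvAcc) :
    pvForCodons inp opt e j acc =
      if j < e then pvForCodons inp opt e (j + 3) (pvPushCodon inp opt j acc) else acc := by
  unfold pvForCodons
  rcases h : (e - j + 2) / 3 with _ | k
  · have hj : ¬ j < e := by omega
    simp [pvForCodonsF, hj]
  · simp only [pvForCodonsF]
    by_cases hj : j < e
    · simp only [hj, if_pos]
      have hk : k = (e - (j + 3) + 2) / 3 := by omega
      rw [hk]
    · simp [hj]

theorem pvForChars_unfold (inp opt : List Char) (e j : Nat) (acc : PvAcc) :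
    pvForChars inp opt e j acc =
      if j < e then pvForChars inp opt e (j + 1) (pvPushChar inp opt j acc) else acc := by
  unfold pvForChars
  rcases h : e - j with _ | k
  · have hj : ¬ j < e := by omega
    simp [pvForCharsF, hj]
  · simp only [pvForCharsF]
    by_cases hj : j < e
    · simp only [hj, if_pos]
      have hk : k = e - (j + 1) := by omega
      rw [hk]
    · simp [hj]

-- the outer loop ignores surplus fuel (each iteration advances i by at least one)
theorem pvLoopAF_congr (inp opt : List Char) (cp : List Int) :
    ∀ fuel fuel' i acc, cp.length - i ≤ fuel → cp.length - i ≤ fuel' →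
      pvLoopAF inp opt cp fuel i acc = pvLoopAF inp opt cp fuel' i acc := by
  intro fuel
  induction fuel with
  | zero =>
    intro fuel' i acc h h'
    rcases fuel' with _ | k
    · rfl
    · have hi : ¬ i < cp.length := by omega
      simp [pvLoopAF, hi]
  | succ n ih =>
    intro fuel' i acc h h'
    rcases fuel' with _ | k
    · have hi : ¬ i < cp.length := by omega
      simp [pvLoopAF, hi]
    · simp only [pvLoopAF]
      by_cases hi : i < cp.length
      · simp only [hi, if_pos]
        by_cases hc : cp.getD i 0 ≠ 0
        · rw [if_pos hc, if_pos hc]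
          have he := pvScan_lt cp true i hi (decide_eq_true hc)
          exact ih k _ _ (by omega) (by omega)
        · rw [if_neg hc, if_neg hc]
          have he := pvScan_lt cp false i hi (decide_eq_false hc)
          exact ih k _ _ (by omega) (by omega)
      · simp [hi]

theorem pvLoopA_unfold (inp opt : List Char) (cp : List Int) (i : Nat) (acc : PvAcc) :
    pvLoopA inp opt cp i acc =
      if i < cp.length then
        (if cp.getD i 0 ≠ 0 then
          pvLoopA inp opt cp (pvScan cp true i) (pvForCodons inp opt (pvScan cp true i) i acc)
        else
          pvLoopA inp opt cp (pvScan cp false i) (pvForChars inp opt (pvScan cp false i) i acc))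
      else acc := by
  unfold pvLoopA
  rcases h : cp.length - i with _ | k
  · have hi : ¬ i < cp.length := by omega
    simp [pvLoopAF, hi]
  · simp only [pvLoopAF]
    by_cases hi : i < cp.length
    · simp only [hi, if_pos]
      by_cases hc : cp.getD i 0 ≠ 0
      · rw [if_pos hc, if_pos hc]
        have he := pvScan_lt cp true i hi (decide_eq_true hc)
        exact pvLoopAF_congr inp opt cp k _ _ _ (by omega) (by omega)
      · rw [if_neg hc, if_neg hc]
        have he := pvScan_lt cp false i hi (decide_eq_false hc)
        exact pvLoopAF_congr inp opt cp k _ _ _ (by omega) (by omega)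
    · simp [hi]

-- proof-only: the by-one-with-counter reading of the range(start, end, 3) loop
def pvForCodons1F (inp opt : List Char) (e : Nat) : Nat → Nat → Nat → PvAcc → PvAcc
  | 0, _, _, acc => acc
  | fuel + 1, j, c, acc =>
    if j < e then
      pvForCodons1F inp opt e fuel (j + 1) (c + 1) (if c % 3 = 0 then pvPushCodon inp opt j acc else acc)
    else acc

def pvForCodons1 (inp opt : List Char) (e : Nat) (j : Nat) (c : Nat) (acc : PvAcc) : PvAcc :=
  pvForCodons1F inp opt e (e - j) j c acc

theorem pvForCodons1_unfold (inp opt : List Char) (e j c : Nat) (acc : PvAcc) :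
    pvForCodons1 inp opt e j c acc =
      if j < e then
        pvForCodons1 inp opt e (j + 1) (c + 1) (if c % 3 = 0 then pvPushCodon inp opt j acc else acc)
      else acc := by
  unfold pvForCodons1
  rcases h : e - j with _ | k
  · have hj : ¬ j < e := by omega
    simp [pvForCodons1F, hj]
  · simp only [pvForCodons1F]
    by_cases hj : j < e
    · simp only [hj, if_pos]
      have hk : k = e - (j + 1) := by omega
      rw [hk]
    · simp [hj]

theorem pvForCodons1_eq (inp opt : List Char) (e : Nat) (j : Nat) (c : Nat) (acc : PvAcc)
    (hc : c % 3 = 0) : pvForCodons1 inp opt e j c acc = pvForCodons inp opt e j acc := by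
  rw [pvForCodons1_unfold, pvForCodons_unfold]
  by_cases h0 : j < e
  · simp only [h0, if_pos, hc]
    rw [pvForCodons1_unfold]
    by_cases h1 : j + 1 < e
    · simp only [h1, if_pos]
      have hc1 : (c + 1) % 3 ≠ 0 := by omega
      simp only [if_neg hc1]
      rw [pvForCodons1_unfold]
      by_cases h2 : j + 2 < e
      · have hc2 : (c + 1 + 1) % 3 ≠ 0 := by omega
        simp only [h2, if_pos, if_neg hc2]
        have hc3 : (c + 1 + 1 + 1) % 3 = 0 := by omega
        have := pvForCodons1_eq inp opt e (j + 3) (c + 1 + 1 + 1) (pvPushCodon inp opt j acc) hc3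
        simpa using this
      · simp only [h2]
        rw [pvForCodons_unfold]
        simp [show ¬ j + 3 < e by omega]
    · simp only [h1]
      rw [pvForCodons_unfold]
      simp [show ¬ j + 3 < e by omega]
  · simp [h0]
termination_by e - j

-- B consumes a whole nonzero run like A's codon loop does
theorem pvLoopB_run (inp opt : List Char) (cp : List Int) (e : Nat) (he : e ≤ cp.length)
    (j c : Nat) (acc : PvAcc) (hje : j ≤ e) (hrun : ∀ k, j ≤ k → k < e → cp.getD k 0 ≠ 0) :
      pvLoopB inp opt (cp.drop j) j c acc =
        pvLoopB inp opt (cp.drop e) e (c + (e - j)) (pvForCodons1 inp opt e j c acc) := by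
  rcases Nat.eq_or_lt_of_le hje with rfl | hlt
  · rw [pvForCodons1_unfold, if_neg (lt_irrefl j), Nat.sub_self, Nat.add_zero]
  · have hjlen : j < cp.length := by omega
    rw [List.drop_eq_getElem_cons hjlen]
    have hgd : cp.getD j 0 = cp[j] := by simp [List.getD_eq_getElem?_getD, List.getElem?_eq_getElem hjlen]
    have hnz : cp[j] ≠ 0 := by rw [← hgd]; exact hrun j le_rfl hlt
    show pvLoopB inp opt (cp[j] :: cp.drop (j+1)) j c acc = _
    rw [pvLoopB, if_neg hnz]
    conv_rhs => rw [pvForCodons1_unfold, if_pos hlt]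
    rw [pvLoopB_run inp opt cp e he (j + 1) (c + 1) _ (by omega) (fun k hk hke => hrun k (by omega) hke)]
    congr 1
    omega
termination_by e - j
decreasing_by omega

-- one non-coding step of A's outer loop
theorem pvLoopA_zero_step (inp opt : List Char) (cp : List Int) (i : Nat) (acc : PvAcc)
    (h : i < cp.length) (hz : cp.getD i 0 = 0) :
    pvLoopA inp opt cp i acc = pvLoopA inp opt cp (i + 1) (pvPushChar inp opt i acc) := by
  have hdec : decide (cp.getD i 0 ≠ 0) = false := decide_eq_false (not_not_intro hz)
  have hscan : pvScan cp false i = pvScan cp false (i + 1) := by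
    rw [pvScan_unfold, if_pos h, if_pos hdec]
  rw [pvLoopA_unfold, if_pos h, if_neg (not_not_intro hz), hscan]
  have hge : i + 1 ≤ pvScan cp false (i + 1) := pvScan_ge cp false (i + 1)
  rw [pvForChars_unfold, if_pos (show i < pvScan cp false (i + 1) by omega)]
  by_cases h1 : i + 1 < cp.length
  · by_cases hz1 : cp.getD (i + 1) 0 = 0
    · conv_rhs => rw [pvLoopA_unfold, if_pos h1, if_neg (not_not_intro hz1)]
    · have hstop : pvScan cp false (i + 1) = i + 1 := by
        rw [pvScan_unfold, if_pos h1,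
          if_neg (by simp only [decide_eq_false_iff_not]; exact not_not_intro hz1)]
      rw [hstop, pvForChars_unfold, if_neg (lt_irrefl _)]
  · have hstop : pvScan cp false (i + 1) = i + 1 := by
      rw [pvScan_unfold, if_neg h1]
    rw [hstop, pvForChars_unfold, if_neg (lt_irrefl _)]

-- main invariant: A from index i equals B on the remaining list, provided B's codon counter
-- is 0 or position i is non-coding (true at every point where A's outer loop resumes)
theorem pvLoop_main (inp opt : List Char) (cp : List Int) :
    ∀ i c acc, i ≤ cp.length → (c = 0 ∨ cp.getD i 0 = 0) →
      pvLoopA inp opt cp i acc = pvLoopB inp opt (cp.drop i) i c acc := by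
  intro i c acc hle hc
  rcases Nat.eq_or_lt_of_le hle with rfl | hlt
  · rw [pvLoopA_unfold, if_neg (lt_irrefl _), List.drop_length]
    rfl
  · rw [List.drop_eq_getElem_cons hlt]
    have hgd : cp.getD i 0 = cp[i] := by simp [List.getD_eq_getElem?_getD, List.getElem?_eq_getElem hlt]
    by_cases hz : cp.getD i 0 = 0
    · have hzi : cp[i] = 0 := hgd ▸ hz
      rw [pvLoopA_zero_step inp opt cp i acc hlt hz, pvLoopB, if_pos hzi]
      exact pvLoop_main inp opt cp (i + 1) 0 (pvPushChar inp opt i acc) (by omega) (Or.inl rfl)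
    · -- coding run
      have hc0 : c = 0 := hc.resolve_right hz
      subst hc0
      rw [← List.drop_eq_getElem_cons hlt]
      rw [pvLoopA_unfold, if_pos hlt, if_pos hz]
      set e := pvScan cp true i with hedef
      have hie : i < e := pvScan_lt cp true i hlt (decide_eq_true hz)
      have hee : e ≤ cp.length := pvScan_le cp true i (by omega)
      have hrun : ∀ k, i ≤ k → k < e → cp.getD k 0 ≠ 0 := by
        intro k h1 h2
        have := pvScan_run cp true i k h1 h2
        simpa using this
      rw [pvLoopB_run inp opt cp e hee i 0 acc (by omega) hrun]
      rw [pvForCodons1_eq inp opt e i 0 acc (by norm_num)]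
      rcases pvScan_stop cp true i (by omega) with hstop | hstop
      · -- e = cp.length : both loops are done
        rw [← hedef] at hstop
        rw [hstop, pvLoopA_unfold, if_neg (lt_irrefl _), List.drop_length]
        rfl
      · rw [← hedef] at hstop
        have hze : cp.getD e 0 = 0 := by simpa using hstop
        exact pvLoop_main inp opt cp e (0 + (e - i)) (pvForCodons inp opt e i acc) hee (Or.inr hze)
termination_by i => cp.length - i
decreasing_by all_goals omega

-- ===== VERDICT (by name: the statement is the Claim_ definition above) =====
theorem mark_non_equal_characters_spec : Claim_equal_mark_non_equal_characters := by
  intro input_seq optimized_seq coding_positions _hDom _hPre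
  unfold Spec_mark_non_equal_characters mark_non_equal_characters mark_non_equal_characters_alt
  by_cases h : PySem.Str.len input_seq = PySem.Str.len optimized_seq
  · rw [if_neg (not_not_intro h), if_neg (not_not_intro h),
      pvLoop_main input_seq.toList optimized_seq.toList coding_positions 0 0 ([], [], [])
        (Nat.zero_le _) (Or.inl rfl), List.drop_zero]
  · rw [if_pos h, if_pos h]
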